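-- pv_equiv track=rewrite | github.com/Bildass/localtuya | tools/search_tuya_local.py | search_templates
-- ===== SOURCE A (Python) =====
-- def search_templates(keywords: list, devices: list) -> list:
--     """Search device names for keywords."""
--     keywords_lower = [k.lower() for k in keywords]
--     matches = []
--
--     for device in devices:
--         device_lower = device.lower()
--         # Check if ALL keywords match
--         if all(kw in device_lower for kw in keywords_lower):
--             matches.append(device)
--
--     return sorted(matches)
-- ===== SOURCE B (Python) =====
-- def search_templates(keywords: list, devices: list) -> list:
--     """Search device names for keywords: successively narrow the candidate set per keyword."""
--     candidates = devices
--     for kw in keywords: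
--         kw = kw.lower()
--         candidates = [d for d in candidates if kw in d.lower()]
--     return sorted(candidates)
-- ===== Notes on version B (the rewrite author's own statement) =====
-- stated objective: alternative
-- what changed: Reversed the loop nesting: instead of one device-outer pass testing all keywords per device, B iterates keywords in the outer loop and successively filters the candidate device list per keyword.
import Mathlib
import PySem

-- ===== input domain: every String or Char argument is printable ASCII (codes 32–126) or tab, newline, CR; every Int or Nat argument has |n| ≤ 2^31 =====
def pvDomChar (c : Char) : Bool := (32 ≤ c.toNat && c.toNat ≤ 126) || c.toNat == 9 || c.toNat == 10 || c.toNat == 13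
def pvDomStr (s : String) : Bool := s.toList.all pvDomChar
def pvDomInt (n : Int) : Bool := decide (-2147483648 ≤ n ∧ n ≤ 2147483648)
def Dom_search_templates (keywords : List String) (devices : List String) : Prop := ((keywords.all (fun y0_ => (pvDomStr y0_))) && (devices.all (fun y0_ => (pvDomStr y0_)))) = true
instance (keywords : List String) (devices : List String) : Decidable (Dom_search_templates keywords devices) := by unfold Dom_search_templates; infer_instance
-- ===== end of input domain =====

-- B reverses the loop nesting (keyword-outer successive filtering of the candidate device list
-- instead of A's device-outer all-keywords test); same cost, proved to return A's exact value.

-- ===== PORT A =====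
def search_templates (keywords : List String) (devices : List String) : List String :=
  let keywords_lower := keywords.map PySem.Str.lower
  let matched := devices.foldl (fun acc device =>
    let device_lower := PySem.Str.lower device
    if keywords_lower.all (fun kw => PySem.Str.isIn kw device_lower) then acc ++ [device] else acc) []
  PySem.List.sorted matched (fun x => x) false

-- ===== PORT B =====
def search_templates_alt (keywords : List String) (devices : List String) : List String :=
  let candidates := keywords.foldl (fun cand k =>
    let kw := PySem.Str.lower k
    cand.filter (fun d => PySem.Str.isIn kw (PySem.Str.lower d))) devices
  PySem.List.sorted candidates (fun x => x) false

-- ===== PRECONDITION & SPEC =====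
def Spec_search_templates (keywords : List String) (devices : List String) (out : List String) : Prop := out = search_templates_alt keywords devices
instance (keywords : List String) (devices : List String) (out : List String) : Decidable (Spec_search_templates keywords devices out) := by unfold Spec_search_templates; infer_instance

-- ===== CLAIM (what is proved, stated in full; the proofs are below) =====
def Claim_equal_search_templates : Prop := ∀ (keywords : List String) (devices : List String), Dom_search_templates keywords devices → Spec_search_templates keywords devices (search_templates keywords devices)

-- ===== LEMMAS AND PROOFS =====

-- ===== VERDICT (by name: the statement is the Claim_ definition above) =====
theorem foldl_filter_eq_filter_all {α β : Type} (p : β → α → Bool) :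
    ∀ (kws : List β) (cand : List α),
      kws.foldl (fun c k => c.filter (p k)) cand
        = cand.filter (fun d => kws.all (fun k => p k d)) := by
  intro kws
  induction kws with
  | nil => intro cand; simp
  | cons k t ih =>
    intro cand
    simp [List.foldl_cons, ih, List.filter_filter, Bool.and_comm]

theorem search_templates_spec : Claim_equal_search_templates := by
  intro keywords devices _
  unfold Spec_search_templates search_templates search_templates_alt
  simp only [PySem.List.foldl_append_if_eq_filter, List.nil_append,
    foldl_filter_eq_filter_all, List.all_map, Function.comp_def]
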